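-- pv_equiv track=rewrite | github.com/RVirmoors/fiction-chatbot | data.py | step_four_parse_text
-- ===== SOURCE A (Python) =====
-- def step_four_parse_text(tokenized):
--     # let's set up some lists to hold our pieces of narrative and dialog
--     parsed_dialog = []
--     parsed_narrative = []
--     # and this list will be a bucket for the text we're currently exploring
--     current = []
--
--     # now let's set up values that will help us loop through the text
--     length = len(tokenized)
--     found_q = False
--     counter = 0
--     quote_open, quote_close = "''", "''"
--
--     # now we'll start our loop saying that as long as our sentence is...
--     while counter < length:
--         word = tokenized[counter]
--
--         # until we find a quotation mark, we're working with narrative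
--         if quote_open not in word and quote_close not in word:
--             current.append(word)
--
--         # here's what we do when we find a closed quote
--         else:
--             # we append the narrative we've collected & clear our our
--             # current variable
--             parsed_narrative.append(current)
--             current = []
--             # now current is ready to hold dialog and we're working on
--             # a piece of dialog
--             current.append(word)
--             found_q = True
--
--             # while we're in the quote, we're going to increment the counter
--             # and append to current in this while loop
--             while found_q and counter < length - 1:
--                 counter += 1
--                 if quote_close not in tokenized[counter]:
--                     current.append(tokenized[counter])
--                 else:
--                     # if we find a closing quote, we add our dialog to the
--                     # appropriate list, clear current and flip our found_q
--                     # variable to False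
--                     current.append(tokenized[counter])
--                     parsed_dialog.append(current)
--                     current = []
--                     found_q = False
--
--         # increment the counter to move us through the text
--         counter += 1
--
--     return (parsed_dialog, parsed_narrative)
-- ===== SOURCE B (Python) =====
-- def step_four_parse_text(tokenized):
--     # Recursive descent: find the first quote token, then its closer, slice
--     # the narrative and dialog segments off the front and recurse on the rest.
--     q = "''"
--
--     def go(rest):
--         for i, w in enumerate(rest):
--             if q in w:
--                 for j in range(i + 1, len(rest)):
--                     if q in rest[j]:
--                         d, n = go(rest[j + 1:])
--                         return ([rest[i:j + 1]] + d, [rest[:i]] + n)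
--                 # dangling opener: its narrative prefix is flushed, dialog dropped
--                 return ([], [rest[:i]])
--         return ([], [])
--
--     return go(tokenized)
-- ===== Notes on version B (the rewrite author's own statement) =====
-- stated objective: simpler
-- what changed: Replaced A's accumulator-threading nested while-loops over a shared counter with a recursive descent that finds the opener/closer quote indices, slices the narrative prefix and dialog segment off the front, and builds both output lists front-to-back.
import Mathlib
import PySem

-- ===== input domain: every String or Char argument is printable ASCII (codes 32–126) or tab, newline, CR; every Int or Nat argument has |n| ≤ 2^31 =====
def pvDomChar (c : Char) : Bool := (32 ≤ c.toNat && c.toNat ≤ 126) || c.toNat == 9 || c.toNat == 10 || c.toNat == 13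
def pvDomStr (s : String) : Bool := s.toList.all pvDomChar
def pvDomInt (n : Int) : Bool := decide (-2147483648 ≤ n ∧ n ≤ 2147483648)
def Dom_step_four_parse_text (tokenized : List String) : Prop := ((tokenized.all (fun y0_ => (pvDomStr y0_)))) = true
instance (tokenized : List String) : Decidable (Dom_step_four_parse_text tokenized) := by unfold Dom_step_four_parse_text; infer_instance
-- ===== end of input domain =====

-- B replaces A's accumulator-based nested while-loops (one shared counter) by a
-- recursive descent that locates the opener/closer quote indices and slices the
-- narrative and dialog segments off the front, building the output front-to-back
-- (objective: simpler).

-- ===== PORT A =====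
-- A walks 'tokenized' by an increasing counter; the port walks the same suffix
-- of the list ('rest' = the tokens from 'counter' on), with the same accumulators.

-- inner while loop: 'while found_q and counter < length - 1': consume tokens
-- after the opener into 'current' until a token containing "''" closes the quote.
-- Returns (remaining tokens after the outer 'counter += 1', current, parsed_dialog, found_q).
def sfptInner (rest : List String) (current : List String) (dialog : List (List String)) :
    List String × List String × List (List String) × Bool :=
  match rest with
  | [] => ([], current, dialog, true)
  | t :: rs =>
    if !(PySem.Str.isIn "''" t) then
      sfptInner rs (current ++ [t]) dialog
    else
      (rs, [], dialog ++ [current ++ [t]], false)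

-- termination helper for the outer loop: the inner loop only consumes tokens
theorem sfptInner_length_le (rest : List String) (current : List String)
    (dialog : List (List String)) : (sfptInner rest current dialog).1.length ≤ rest.length := by
  induction rest generalizing current dialog with
  | nil => simp [sfptInner]
  | cons t rs ih =>
    simp only [sfptInner]
    split
    · exact le_trans (ih _ _) (by simp)
    · simp

-- outer while loop over the remaining suffix, same state as A
def sfptOuter (rest : List String) (current : List String)
    (dialog narrative : List (List String)) : List (List String) × List (List String) :=
  match rest with
  | [] => (dialog, narrative)
  | word :: rs =>
    if !(PySem.Str.isIn "''" word) && !(PySem.Str.isIn "''" word) then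
      sfptOuter rs (current ++ [word]) dialog narrative
    else
      let r := sfptInner rs [word] dialog
      sfptOuter r.1 r.2.1 r.2.2.1 (narrative ++ [current])
termination_by rest.length
decreasing_by
  all_goals simp
  all_goals (have h := sfptInner_length_le rs [word] dialog; simp at h; omega)

def step_four_parse_text (tokenized : List String) : List (List String) × List (List String) :=
  sfptOuter tokenized [] [] []

-- ===== PORT B =====
-- 'for i, w in enumerate(rest): if q in w:' — index of the first quote token
def sfptFirstQ (rest : List String) : Option Nat :=
  match rest with
  | [] => none
  | w :: rs => if PySem.Str.isIn "''" w then some 0 else (sfptFirstQ rs).map (· + 1)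

-- go(rest): first quote index i, first quote index j in range(i+1, len(rest)),
-- slice rest[:i], rest[i:j+1], recurse on rest[j+1:]  (nonnegative in-range
-- slices, ported as drop/take)
def sfptGo (rest : List String) : List (List String) × List (List String) :=
  match hq : sfptFirstQ rest with
  | none => ([], [])
  | some i =>
    match sfptFirstQ (rest.drop (i + 1)) with
    | none => ([], [rest.take i])
    | some k =>
      let j := i + 1 + k
      let r := sfptGo (rest.drop (j + 1))
      ((rest.drop i).take (j + 1 - i) :: r.1, rest.take i :: r.2)
termination_by rest.length
decreasing_by
  have hne : rest ≠ [] := by intro h; subst h; simp [sfptFirstQ] at hq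
  cases rest with
  | nil => exact absurd rfl hne
  | cons a l => simp

def step_four_parse_text_alt (tokenized : List String) : List (List String) × List (List String) :=
  sfptGo tokenized

-- ===== PRECONDITION & SPEC =====
def Spec_step_four_parse_text (tokenized : List String) (out : List (List String) × List (List String)) : Prop := out = step_four_parse_text_alt tokenized
instance (tokenized : List String) (out : List (List String) × List (List String)) : Decidable (Spec_step_four_parse_text tokenized out) := by unfold Spec_step_four_parse_text; infer_instance

-- ===== CLAIM (what is proved, stated in full; the proofs are below) =====
def Claim_equal_step_four_parse_text : Prop := ∀ (tokenized : List String), Dom_step_four_parse_text tokenized → Spec_step_four_parse_text tokenized (step_four_parse_text tokenized)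

-- ===== LEMMAS AND PROOFS =====

-- first narrative chunk of B's result gets A's pending 'current' prepended
def sfptConsHead (cur : List String) (l : List (List String)) : List (List String) :=
  match l with
  | [] => []
  | h :: t => (cur ++ h) :: t

theorem sfptConsHead_nil (l : List (List String)) : sfptConsHead [] l = l := by
  cases l <;> simp [sfptConsHead]

-- the inner while loop, characterised by the first quote index of its suffix
theorem sfptInner_none (rest : List String) (cur : List String) (dlg : List (List String))
    (h : sfptFirstQ rest = none) : sfptInner rest cur dlg = ([], cur ++ rest, dlg, true) := by
  induction rest generalizing cur with
  | nil => simp [sfptInner]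
  | cons t rs ih =>
    by_cases ht : PySem.Chars.isIn ['\'', '\''] t.toList = true
    · exfalso
      simp [sfptFirstQ, ht] at h
    · rw [Bool.not_eq_true] at ht
      simp [sfptFirstQ, ht] at h
      rw [show sfptInner (t :: rs) cur dlg = sfptInner rs (cur ++ [t]) dlg from by
        simp [sfptInner, ht]]
      rw [ih _ h]
      simp

theorem sfptInner_some (rest : List String) (cur : List String) (dlg : List (List String))
    (k : Nat) (h : sfptFirstQ rest = some k) :
    sfptInner rest cur dlg = (rest.drop (k + 1), [], dlg ++ [cur ++ rest.take (k + 1)], false) := by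
  induction rest generalizing cur k with
  | nil => simp [sfptFirstQ] at h
  | cons t rs ih =>
    by_cases ht : PySem.Chars.isIn ['\'', '\''] t.toList = true
    · have hk : k = 0 := by
        simp [sfptFirstQ, ht] at h
        omega
      subst hk
      simp [sfptInner, ht]
    · rw [Bool.not_eq_true] at ht
      simp [sfptFirstQ, ht] at h
      obtain ⟨k', hk', rfl⟩ := h
      rw [show sfptInner (t :: rs) cur dlg = sfptInner rs (cur ++ [t]) dlg from by
        simp [sfptInner, ht]]
      rw [ih _ _ hk']
      simp

-- unfolding equations for B's recursive descent
theorem sfptGo_none (rest : List String) (h : sfptFirstQ rest = none) :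
    sfptGo rest = ([], []) := by
  rw [sfptGo, h]

theorem sfptGo_some_none (rest : List String) (i : Nat) (h1 : sfptFirstQ rest = some i)
    (h2 : sfptFirstQ (rest.drop (i + 1)) = none) : sfptGo rest = ([], [rest.take i]) := by
  rw [sfptGo, h1]
  simp [h2]

theorem sfptGo_some_some (rest : List String) (i k : Nat) (h1 : sfptFirstQ rest = some i)
    (h2 : sfptFirstQ (rest.drop (i + 1)) = some k) :
    sfptGo rest = ((rest.drop i).take (i + 1 + k + 1 - i) :: (sfptGo (rest.drop (i + 1 + k + 1))).1,
                   rest.take i :: (sfptGo (rest.drop (i + 1 + k + 1))).2) := by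
  rw [sfptGo, h1]
  simp [h2]

-- clean form of sfptGo_some_some at i = 0 (the opener is the head token)
theorem sfptGo_zero_some (rest : List String) (k : Nat) (h1 : sfptFirstQ rest = some 0)
    (h2 : sfptFirstQ (rest.drop 1) = some k) :
    sfptGo rest = (rest.take (k + 2) :: (sfptGo (rest.drop (k + 2))).1,
                   [] :: (sfptGo (rest.drop (k + 2))).2) := by
  rw [sfptGo_some_some rest 0 k h1 (by simpa using h2)]
  simp [show 0 + 1 + k + 1 = k + 2 from by omega]

-- main loop invariant: the outer while loop equals B's descent with the
-- accumulators spliced in front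
theorem sfptOuter_eq_go (n : Nat) : ∀ (rest : List String), rest.length ≤ n →
    ∀ (cur : List String) (dlg nar : List (List String)),
    sfptOuter rest cur dlg nar =
      (dlg ++ (sfptGo rest).1, nar ++ sfptConsHead cur (sfptGo rest).2) := by
  induction n with
  | zero =>
    intro rest hlen cur dlg nar
    have : rest = [] := List.length_eq_zero_iff.mp (Nat.le_zero.mp hlen)
    subst this
    rw [sfptGo_none _ rfl]
    simp [sfptOuter, sfptConsHead]
  | succ n ih =>
    intro rest hlen cur dlg nar
    cases rest with
    | nil =>
      rw [sfptGo_none _ rfl]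
      simp [sfptOuter, sfptConsHead]
    | cons w rs =>
      by_cases hw : PySem.Chars.isIn ['\'', '\''] w.toList = true
      · -- quote token: A flushes the narrative and enters the inner loop
        have hq0 : sfptFirstQ (w :: rs) = some 0 := by simp [sfptFirstQ, hw]
        rw [show sfptOuter (w :: rs) cur dlg nar =
              (let r := sfptInner rs [w] dlg
               sfptOuter r.1 r.2.1 r.2.2.1 (nar ++ [cur])) from by
          simp [sfptOuter, hw]]
        cases hq : sfptFirstQ rs with
        | none =>
          rw [sfptInner_none _ _ _ hq]
          rw [sfptGo_some_none _ 0 hq0 (by simpa using hq)]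
          simp [sfptOuter, sfptConsHead]
        | some k =>
          rw [sfptInner_some _ _ _ _ hq]
          have hlen' : (rs.drop (k + 1)).length ≤ n := by
            simp at hlen ⊢
            omega
          rw [ih _ hlen']
          rw [sfptGo_zero_some _ k hq0 (by simpa using hq)]
          rw [sfptConsHead_nil]
          simp [sfptConsHead]
      · -- narrative token: A appends it to 'current'
        rw [Bool.not_eq_true] at hw
        rw [show sfptOuter (w :: rs) cur dlg nar = sfptOuter rs (cur ++ [w]) dlg nar from by
          simp [sfptOuter, hw]]
        have hlen' : rs.length ≤ n := by simp at hlen; omega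
        rw [ih _ hlen']
        cases hq : sfptFirstQ rs with
        | none =>
          have hq1 : sfptFirstQ (w :: rs) = none := by simp [sfptFirstQ, hw, hq]
          rw [sfptGo_none _ hq, sfptGo_none _ hq1]
          simp [sfptConsHead]
        | some i =>
          have hq1 : sfptFirstQ (w :: rs) = some (i + 1) := by simp [sfptFirstQ, hw, hq]
          cases hq2 : sfptFirstQ (rs.drop (i + 1)) with
          | none =>
            rw [sfptGo_some_none _ _ hq hq2,
                sfptGo_some_none _ _ hq1 (by simpa using hq2)]
            simp [sfptConsHead]
          | some k =>
            rw [sfptGo_some_some _ _ _ hq hq2,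
                sfptGo_some_some _ _ _ hq1 (by simpa using hq2)]
            simp only [List.drop_succ_cons, List.take_succ_cons,
              show i + 1 + 1 + k + 1 = (i + 1 + k + 1) + 1 from by omega]
            simp [sfptConsHead]

-- ===== VERDICT (by name: the statement is the Claim_ definition above) =====
theorem step_four_parse_text_spec : Claim_equal_step_four_parse_text := by
  intro tokenized _
  unfold Spec_step_four_parse_text step_four_parse_text step_four_parse_text_alt
  rw [sfptOuter_eq_go tokenized.length tokenized (le_refl _)]
  rw [sfptConsHead_nil]
  simp
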